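-- pv_equiv track=rewrite | github.com/Jane511/external-benchmark | ingestion/adapters/mqg_pillar3_pdf_adapter.py | _join_non_performing_band
-- ===== SOURCE A (Python) =====
-- def _join_non_performing_band(lines: list[str]) -> list[str]:
--     out: list[str] = []
--     i = 0
--     while i < len(lines):
--         line = lines[i].strip()
--         if line == "100.00 (Non-" and i + 1 < len(lines):
--             nxt = lines[i + 1].strip()
--             if nxt.startswith("Performing)"):
--                 out.append(f"100.00 (Non-Performing) {nxt[len('Performing)'):].strip()}")
--                 i += 2
--                 continue
--         out.append(line)
--         i += 1
--     return out
-- ===== SOURCE B (Python) =====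
-- def _join_non_performing_band(lines: list[str]) -> list[str]:
--     out: list[str] = []
--     for raw in lines:
--         line = raw.strip()
--         if line.startswith("Performing)") and out and out[-1] == "100.00 (Non-":
--             out[-1] = f"100.00 (Non-Performing) {line[len('Performing)'):].strip()}"
--         else:
--             out.append(line)
--     return out
-- ===== Notes on version B (the rewrite author's own statement) =====
-- stated objective: alternative
-- what changed: A's look-ahead with an index skip (peek at lines[i+1], consume two lines) is replaced by a look-behind back-patch: one plain for-loop that appends each stripped line and, on seeing a 'Performing)' continuation, rewrites the previously appended bare '100.00 (Non-' sentinel in place.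
import Mathlib
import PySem

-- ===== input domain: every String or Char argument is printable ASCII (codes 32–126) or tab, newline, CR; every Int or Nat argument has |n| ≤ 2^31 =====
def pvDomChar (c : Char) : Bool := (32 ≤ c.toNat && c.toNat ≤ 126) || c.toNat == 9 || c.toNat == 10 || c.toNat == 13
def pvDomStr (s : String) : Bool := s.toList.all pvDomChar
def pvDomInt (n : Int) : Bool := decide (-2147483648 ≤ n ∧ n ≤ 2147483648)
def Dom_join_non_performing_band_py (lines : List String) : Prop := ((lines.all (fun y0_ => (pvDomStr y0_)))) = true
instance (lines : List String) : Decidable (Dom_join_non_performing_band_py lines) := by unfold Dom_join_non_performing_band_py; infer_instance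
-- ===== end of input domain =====

-- B replaces A's look-ahead-with-skip by a single forward pass that back-patches the
-- previously emitted bare "100.00 (Non-" element; same O(n) cost, alternative decomposition.

-- ===== PORT A =====
-- A's while-loop with index i and look-ahead lines[i+1]; the [l] case is i+1 = len(lines).
def join_non_performing_band_py : List String → List String
  | [] => []
  | [l] => [PySem.Str.strip l]
  | l :: nxt0 :: rest =>
    if PySem.Str.strip l = "100.00 (Non-" then
      if PySem.Str.startswith (PySem.Str.strip nxt0) "Performing)" then
        ("100.00 (Non-Performing) " ++
            PySem.Str.strip (PySem.Str.slice (PySem.Str.strip nxt0) (some 11) none))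
          :: join_non_performing_band_py rest
      else PySem.Str.strip l :: join_non_performing_band_py (nxt0 :: rest)
    else PySem.Str.strip l :: join_non_performing_band_py (nxt0 :: rest)

-- ===== PORT B =====
-- one step of B's for-loop: append the stripped line, or back-patch the last element (out[-1] = …)
def jnpbStep (out : List String) (raw : String) : List String :=
  if PySem.Str.startswith (PySem.Str.strip raw) "Performing)" = true
      ∧ out.getLast? = some "100.00 (Non-" then
    out.dropLast ++ ["100.00 (Non-Performing) " ++
        PySem.Str.strip (PySem.Str.slice (PySem.Str.strip raw) (some 11) none)]
  else out ++ [PySem.Str.strip raw]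

def join_non_performing_band_py_alt (lines : List String) : List String :=
  lines.foldl jnpbStep []

-- ===== PRECONDITION & SPEC =====
def Spec_join_non_performing_band_py (lines : List String) (out : List String) : Prop := out = join_non_performing_band_py_alt lines
instance (lines : List String) (out : List String) : Decidable (Spec_join_non_performing_band_py lines out) := by unfold Spec_join_non_performing_band_py; infer_instance

-- ===== CLAIM (what is proved, stated in full; the proofs are below) =====
def Claim_equal_join_non_performing_band_py : Prop := ∀ (lines : List String), Dom_join_non_performing_band_py lines → Spec_join_non_performing_band_py lines (join_non_performing_band_py lines)

-- ===== LEMMAS AND PROOFS =====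

-- a merged element can never equal the bare sentinel (length 24 + |t| ≠ 12)
theorem jnpb_merged_ne (t : String) :
    "100.00 (Non-Performing) " ++ t ≠ "100.00 (Non-" := by
  intro h
  have hl := congrArg String.length h
  have h24 : ("100.00 (Non-Performing) " : String).length = 24 := by decide
  have h12 : ("100.00 (Non-" : String).length = 12 := by decide
  rw [String.length_append, h24, h12] at hl
  omega

-- the sentinel itself does not start with "Performing)"
theorem jnpb_sentinel_not_perf :
    PySem.Str.startswith ("100.00 (Non-" : String) "Performing)" = false := by decide

theorem jnpb_key (lines : List String) : ∀ acc : List String,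
    (acc.getLast? = some "100.00 (Non-" →
      ∀ h, lines.head? = some h →
        PySem.Str.startswith (PySem.Str.strip h) "Performing)" = false) →
    lines.foldl jnpbStep acc = acc ++ join_non_performing_band_py lines := by
  induction lines using join_non_performing_band_py.induct with
  | case1 =>
    intro acc _
    simp [join_non_performing_band_py]
  | case2 l =>
    intro acc H
    simp only [List.foldl, join_non_performing_band_py, jnpbStep]
    split_ifs with h
    · rw [H h.2 l rfl] at h
      exact absurd h.1 (by simp)
    · rfl
  | case3 l nxt0 rest hline hsw IH =>
    intro acc H
    have h1 : jnpbStep acc l = acc ++ ["100.00 (Non-"] := by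
      unfold jnpbStep
      rw [hline]
      split_ifs with h
      · rw [jnpb_sentinel_not_perf] at h
        exact absurd h.1 (by simp)
      · rfl
    have h2 : jnpbStep (acc ++ ["100.00 (Non-"]) nxt0
        = acc ++ ["100.00 (Non-Performing) " ++
            PySem.Str.strip (PySem.Str.slice (PySem.Str.strip nxt0) (some 11) none)] := by
      unfold jnpbStep
      split_ifs with h
      · simp
      · exact absurd ⟨hsw, by simp⟩ h
    have h3 := IH (acc ++ ["100.00 (Non-Performing) " ++
        PySem.Str.strip (PySem.Str.slice (PySem.Str.strip nxt0) (some 11) none)])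
      (by
        intro hlast
        rw [List.getLast?_concat] at hlast
        exact absurd (Option.some.inj hlast) (jnpb_merged_ne _))
    simp only [List.foldl] at h3 ⊢
    rw [h1, h2, h3, join_non_performing_band_py, if_pos hline, if_pos hsw]
    simp
  | case4 l nxt0 rest hline hsw IH =>
    intro acc H
    have h1 : jnpbStep acc l = acc ++ ["100.00 (Non-"] := by
      unfold jnpbStep
      rw [hline]
      split_ifs with h
      · rw [jnpb_sentinel_not_perf] at h
        exact absurd h.1 (by simp)
      · rfl
    have h3 := IH (acc ++ ["100.00 (Non-"])
      (by
        intro _ h hh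
        rw [List.head?_cons] at hh
        rw [← Option.some.inj hh]
        exact eq_false_of_ne_true hsw)
    simp only [List.foldl] at h3 ⊢
    rw [h1, h3, join_non_performing_band_py, if_pos hline, if_neg hsw]
    simp [hline]
  | case5 l nxt0 rest hline IH =>
    intro acc H
    have h1 : jnpbStep acc l = acc ++ [PySem.Str.strip l] := by
      unfold jnpbStep
      split_ifs with h
      · rw [H h.2 l rfl] at h
        exact absurd h.1 (by simp)
      · rfl
    have h3 := IH (acc ++ [PySem.Str.strip l])
      (by
        intro hlast
        rw [List.getLast?_concat] at hlast
        exact absurd (Option.some.inj hlast) hline)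
    simp only [List.foldl] at h3 ⊢
    rw [h1, h3, join_non_performing_band_py, if_neg hline]
    simp

-- ===== VERDICT (by name: the statement is the Claim_ definition above) =====
theorem join_non_performing_band_py_spec : Claim_equal_join_non_performing_band_py := by
  intro lines _
  unfold Spec_join_non_performing_band_py join_non_performing_band_py_alt
  have := jnpb_key lines [] (by simp)
  simpa using this.symm
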